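-- pv_equiv track=rewrite | github.com/matsushibadenki/sara-engine-project | tests/test_v_jepa.py | generate_video_stream
-- ===== SOURCE A (Python) =====
-- def generate_video_stream(num_frames=10, dim=64):
--     """Generates a simple moving pattern in a spike stream."""
--     stream = []
--     for t in range(num_frames):
--         # A simple pattern that moves by 1 bit each frame
--         frame = [0] * dim
--         pos = (t * 4) % dim
--         for i in range(4):
--             frame[(pos + i) % dim] = 1
--         stream.append([i for i, s in enumerate(frame) if s == 1])
--     return stream
-- ===== SOURCE B (Python) =====
-- def _frame(dim, pos):
--     """Closed-form sorted spike positions {(pos+i)%dim : i<4} for one frame."""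
--     if dim < 4:
--         return list(range(dim))
--     if pos <= dim - 4:
--         return list(range(pos, pos + 4))
--     return list(range(pos + 4 - dim)) + list(range(pos, dim))
--
--
-- def generate_video_stream(num_frames=10, dim=64):
--     """Generates a simple moving pattern in a spike stream."""
--     return [_frame(dim, 4 * t % dim) for t in range(num_frames)]
-- ===== Notes on version B (the rewrite author's own statement) =====
-- stated objective: faster
-- what changed: B replaces A's per-frame O(dim) indicator array, four modular bit-sets and enumerate scan by a closed-form construction of each frame's sorted spike list directly from pos=(4*t)%dim via at most two range() segments (the wrap-around split), with no per-element scan.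
import Mathlib
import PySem

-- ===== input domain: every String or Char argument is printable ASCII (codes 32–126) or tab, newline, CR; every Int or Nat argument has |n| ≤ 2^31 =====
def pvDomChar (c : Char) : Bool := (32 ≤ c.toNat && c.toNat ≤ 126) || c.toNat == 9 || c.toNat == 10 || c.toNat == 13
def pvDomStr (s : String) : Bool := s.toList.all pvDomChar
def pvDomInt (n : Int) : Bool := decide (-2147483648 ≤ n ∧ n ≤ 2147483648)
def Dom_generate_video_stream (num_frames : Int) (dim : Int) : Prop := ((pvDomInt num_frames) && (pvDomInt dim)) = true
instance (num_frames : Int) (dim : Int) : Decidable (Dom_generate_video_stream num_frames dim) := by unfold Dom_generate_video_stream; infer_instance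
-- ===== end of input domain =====

-- B replaces A's per-frame O(dim) indicator array + enumerate scan by a closed-form construction of
-- each frame's sorted spike list from pos as at most two range segments (asymptotically faster per frame).

-- ===== PORT A =====
-- Python's enumerate(frame): same index-value pairs as PySem.List.enumerate (proved equal below),
-- written as a tail-recursive fold so the port evaluates on large frames
def pvEnumFold (xs : List Int) : List (Int × Int) :=
  ((xs.foldl (fun (st : Int × List (Int × Int)) x => (st.1 + 1, (st.1, x) :: st.2))
      ((0 : Int), ([] : List (Int × Int)))).2).reverse

def generate_video_stream (num_frames : Int) (dim : Int) : List (List Int) :=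
  (PySem.List.pyRange 0 num_frames 1).foldl (fun stream t =>
    let frame : List Int := PySem.List.pyRepeat [0] dim
    let pos : Int := PySem.Int.mod (t * 4) dim
    let frame := (PySem.List.pyRange 0 4 1).foldl
      (fun fr i => PySem.List.pySetD fr (PySem.Int.mod (pos + i) dim) 1) frame
    stream ++ [((pvEnumFold frame).filter (fun p => p.2 == 1)).map (fun p => p.1)]) []

-- ===== PORT B =====
-- closed-form sorted spike positions {(pos+i)%dim : i<4} for one frame (Python helper _frame)
def pvFrame (dim : Int) (pos : Int) : List Int :=
  if dim < 4 then PySem.List.pyRange 0 dim 1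
  else if pos ≤ dim - 4 then PySem.List.pyRange pos (pos + 4) 1
  else PySem.List.pyRange 0 (pos + 4 - dim) 1 ++ PySem.List.pyRange pos dim 1

def generate_video_stream_alt (num_frames : Int) (dim : Int) : List (List Int) :=
  (PySem.List.pyRange 0 num_frames 1).map (fun t => pvFrame dim (PySem.Int.mod (4 * t) dim))

-- ===== PRECONDITION & SPEC =====
-- Pre_ excludes exactly the inputs where A raises: with at least one frame, dim = 0 makes '%'
-- raise ZeroDivisionError and dim < 0 makes the frame assignment raise IndexError.
def Pre_generate_video_stream (num_frames : Int) (dim : Int) : Prop :=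
  num_frames ≤ 0 ∨ 1 ≤ dim
instance (num_frames : Int) (dim : Int) : Decidable (Pre_generate_video_stream num_frames dim) := by
  unfold Pre_generate_video_stream; infer_instance
def pvWitness_generate_video_stream : Int × Int := (10, 64)

def Spec_generate_video_stream (num_frames : Int) (dim : Int) (out : List (List Int)) : Prop := out = generate_video_stream_alt num_frames dim
instance (num_frames : Int) (dim : Int) (out : List (List Int)) : Decidable (Spec_generate_video_stream num_frames dim out) := by unfold Spec_generate_video_stream; infer_instance

-- ===== CLAIM (what is proved, stated in full; the proofs are below) =====
def Claim_equal_generate_video_stream : Prop := ∀ (num_frames : Int) (dim : Int), Dom_generate_video_stream num_frames dim → Pre_generate_video_stream num_frames dim → Spec_generate_video_stream num_frames dim (generate_video_stream num_frames dim)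


-- ===== LEMMAS AND PROOFS =====

theorem pvEnumFold_aux (xs : List Int) : ∀ (s : Int) (acc : List (Int × Int)),
    xs.foldl (fun (st : Int × List (Int × Int)) x => (st.1 + 1, (st.1, x) :: st.2)) (s, acc)
      = (s + xs.length, (PySem.List.enumerate xs s).reverse ++ acc) := by
  induction xs with
  | nil => intro s acc; simp [PySem.List.enumerate_nil]
  | cons x xs ih =>
    intro s acc
    rw [List.foldl_cons, ih, PySem.List.enumerate_cons]
    refine Prod.ext ?_ ?_
    · simp; omega
    · simp

theorem pvEnumFold_eq (xs : List Int) : pvEnumFold xs = PySem.List.enumerate xs 0 := by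
  unfold pvEnumFold
  rw [pvEnumFold_aux]
  simp

-- indicator frame of length d for the Boolean predicate P
def pvInd (d : Nat) (P : Nat → Bool) : List Int :=
  (List.range d).map (fun k => if P k then (1 : Int) else 0)

theorem pvInd_set (d : Nat) (P : Nat → Bool) (j : Nat) (hj : j < d) :
    (pvInd d P).set j 1 = pvInd d (fun k => P k || k == j) := by
  apply List.ext_getElem <;> simp [pvInd]
  intro i hi
  rcases eq_or_ne i j with rfl | hne
  · simp
  · rw [List.getElem_set, if_neg (fun h => hne h.symm)]
    simp [hne]

theorem pvInd_extract (d : Nat) (P : Nat → Bool) :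
    ((PySem.List.enumerate (pvInd d P) 0).filter (fun p => p.2 == 1)).map (fun p => p.1)
      = List.map (fun k : Nat => (k : Int)) ((List.range d).filter P) := by
  induction d with
  | zero => simp [pvInd]
  | succ d ih =>
    have h1 : pvInd (d + 1) P = pvInd d P ++ [if P d then (1 : Int) else 0] := by
      simp [pvInd, List.range_succ]
    rw [h1, PySem.List.enumerate_append, List.filter_append, List.map_append, ih,
        List.range_succ, List.filter_append, List.map_append]
    congr 1
    by_cases h : P d <;>
      simp [h, pvInd, PySem.List.enumerate_cons, PySem.List.enumerate_nil]

-- a strictly increasing list of values in [0, dim) IS the sorted filter of range by membership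
theorem pv_eq_filter_form (dim : Int) (L ps : List Int)
    (hsorted : L.Pairwise (· < ·))
    (hb : ∀ x ∈ L, 0 ≤ x ∧ x < dim)
    (hmem : ∀ x : Int, x ∈ L ↔ x ∈ ps) :
    List.map (fun k : Nat => (k : Int))
      ((List.range dim.toNat).filter (fun k => ps.contains ((k : Nat) : Int))) = L := by
  have hLnodup : L.Nodup := hsorted.imp (fun h => ne_of_lt h)
  refine List.Perm.eq_of_pairwise (le := (· < ·))
    (fun a b _ _ h1 h2 => absurd h2 (lt_asymm h1)) ?_ hsorted ?_
  · refine List.Pairwise.map _ (fun a b h => by exact_mod_cast h) ?_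
    exact List.Pairwise.filter _ (List.pairwise_lt_range)
  · rw [List.perm_ext_iff_of_nodup
      (((List.nodup_range).filter _).map (fun a b h => by exact_mod_cast h)) hLnodup]
    intro x
    simp only [List.mem_map, List.mem_filter, List.mem_range, List.contains_iff_mem]
    constructor
    · rintro ⟨k, ⟨hk, hps⟩, rfl⟩
      exact (hmem _).2 hps
    · intro hx
      obtain ⟨hx0, hxd⟩ := hb x hx
      exact ⟨x.toNat, ⟨by omega, by rw [Int.toNat_of_nonneg hx0]; exact (hmem _).1 hx⟩,
        Int.toNat_of_nonneg hx0⟩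

-- (pos+i) % dim, written without mod, for dim ≥ 4 and 0 ≤ pos < dim
theorem pv_mod_cases (dim pos i : Int) (hd : 4 ≤ dim) (hp0 : 0 ≤ pos) (hp1 : pos < dim)
    (hi0 : 0 ≤ i) (hi3 : i ≤ 3) :
    (PySem.Int.mod (pos + i) dim = pos + i ∧ pos + i < dim) ∨
    (PySem.Int.mod (pos + i) dim = pos + i - dim ∧ dim ≤ pos + i) := by
  rw [PySem.Int.mod_eq_emod_of_pos (b := dim) (by omega)]
  by_cases h : pos + i < dim
  · exact Or.inl ⟨Int.emod_eq_of_lt (by omega) h, h⟩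
  · refine Or.inr ⟨?_, by omega⟩
    have h1 : pos + i - dim + dim * 1 = pos + i := by ring
    calc (pos + i) % dim = (pos + i - dim + dim * 1) % dim := by rw [h1]
      _ = (pos + i - dim) % dim := Int.add_mul_emod_self_left _ _ _
      _ = pos + i - dim := Int.emod_eq_of_lt (by omega) (by omega)

-- the single-frame equality: A's array scan equals B's closed-form frame
theorem pv_frame_eq (dim pos : Int) (hd : 1 ≤ dim) (hp0 : 0 ≤ pos) (hp1 : pos < dim) :
    ((PySem.List.enumerate
        ((PySem.List.pyRange 0 4 1).foldl
          (fun fr i => PySem.List.pySetD fr (PySem.Int.mod (pos + i) dim) 1)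
          (PySem.List.pyRepeat [(0 : Int)] dim)) 0).filter (fun p => p.2 == 1)).map (fun p => p.1)
      = pvFrame dim pos := by
  by_cases hsmall : dim < 4
  · -- dim ∈ {1,2,3}: everything is a closed computation
    interval_cases dim <;> interval_cases pos <;> decide
  · -- dim ≥ 4
    have hd4 : 4 ≤ dim := by omega
    have hdpos : 0 < dim := by omega
    have hrange : PySem.List.pyRange 0 4 1 = [0, 1, 2, 3] := by decide
    have hq0 : ∀ i : Int, 0 ≤ PySem.Int.mod (pos + i) dim := fun i => PySem.Int.mod_nonneg _ hdpos
    have hq1 : ∀ i : Int, PySem.Int.mod (pos + i) dim < dim := fun i => PySem.Int.mod_lt _ hdpos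
    have hrep : PySem.List.pyRepeat [(0 : Int)] dim = pvInd dim.toNat (fun _ => false) := by
      simp [PySem.List.pyRepeat_singleton, pvInd, List.map_const']
    have hset : ∀ (i : Int) (P : Nat → Bool),
        PySem.List.pySetD (pvInd dim.toNat P) (PySem.Int.mod (pos + i) dim) 1
          = pvInd dim.toNat (fun k => P k || k == (PySem.Int.mod (pos + i) dim).toNat) := by
      intro i P
      rw [PySem.List.pySetD_of_nonneg _ _ (hq0 i)]
      exact pvInd_set _ P _ (by have := hq1 i; have := hq0 i; omega)
    rw [hrange, hrep]
    simp only [List.foldl_cons, List.foldl_nil, hset]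
    rw [pvInd_extract]
    have cast_eq : ∀ (m : Int), 0 ≤ m → ∀ k : Nat, (k == m.toNat) = ((k : Int) == m) := by
      intro m hm k
      by_cases h : k = m.toNat
      · simp [h, Int.toNat_of_nonneg hm]
      · have hne : (k : Int) ≠ m := by omega
        simp [h, hne]
    have hpred : ∀ k ∈ List.range dim.toNat,
        ((((false || (k == (PySem.Int.mod (pos + 0) dim).toNat))
            || (k == (PySem.Int.mod (pos + 1) dim).toNat))
            || (k == (PySem.Int.mod (pos + 2) dim).toNat))
            || (k == (PySem.Int.mod (pos + 3) dim).toNat))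
          = ([PySem.Int.mod (pos + 0) dim, PySem.Int.mod (pos + 1) dim,
              PySem.Int.mod (pos + 2) dim, PySem.Int.mod (pos + 3) dim]).contains ((k : Nat) : Int) := by
      intro k _
      simp only [List.contains_cons, List.contains_nil, Bool.false_or, Bool.or_false,
        cast_eq _ (hq0 0) k, cast_eq _ (hq0 1) k, cast_eq _ (hq0 2) k, cast_eq _ (hq0 3) k]
      rw [Bool.or_assoc, Bool.or_assoc]
    rw [List.filter_congr hpred]
    -- now the closed-form side
    have km0 := pv_mod_cases dim pos 0 hd4 hp0 hp1 (by omega) (by omega)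
    have km1 := pv_mod_cases dim pos 1 hd4 hp0 hp1 (by omega) (by omega)
    have km2 := pv_mod_cases dim pos 2 hd4 hp0 hp1 (by omega) (by omega)
    have km3 := pv_mod_cases dim pos 3 hd4 hp0 hp1 (by omega) (by omega)
    apply pv_eq_filter_form
    · -- pairwise <
      unfold pvFrame
      rw [if_neg hsmall]
      by_cases hw : pos ≤ dim - 4
      · rw [if_pos hw]; exact PySem.List.pairwise_lt_pyRange_one _ _
      · rw [if_neg hw]
        rw [List.pairwise_append]
        refine ⟨PySem.List.pairwise_lt_pyRange_one _ _, PySem.List.pairwise_lt_pyRange_one _ _, ?_⟩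
        intro a ha b hb
        rw [PySem.List.mem_pyRange_one] at ha hb
        omega
    · -- bounds
      intro x hx
      unfold pvFrame at hx
      rw [if_neg hsmall] at hx
      by_cases hw : pos ≤ dim - 4
      · rw [if_pos hw, PySem.List.mem_pyRange_one] at hx; omega
      · rw [if_neg hw, List.mem_append, PySem.List.mem_pyRange_one,
          PySem.List.mem_pyRange_one] at hx
        omega
    · -- membership
      intro x
      unfold pvFrame
      rw [if_neg hsmall]
      by_cases hw : pos ≤ dim - 4
      · rw [if_pos hw]
        simp only [PySem.List.mem_pyRange_one, List.mem_cons, List.not_mem_nil, or_false]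
        rcases km0 with ⟨e0, b0⟩ | ⟨e0, b0⟩ <;> rcases km1 with ⟨e1, b1⟩ | ⟨e1, b1⟩ <;>
          rcases km2 with ⟨e2, b2⟩ | ⟨e2, b2⟩ <;> rcases km3 with ⟨e3, b3⟩ | ⟨e3, b3⟩ <;>
          rw [e0, e1, e2, e3] <;> omega
      · rw [if_neg hw]
        simp only [List.mem_append, PySem.List.mem_pyRange_one, List.mem_cons,
          List.not_mem_nil, or_false]
        rcases km0 with ⟨e0, b0⟩ | ⟨e0, b0⟩ <;> rcases km1 with ⟨e1, b1⟩ | ⟨e1, b1⟩ <;>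
          rcases km2 with ⟨e2, b2⟩ | ⟨e2, b2⟩ <;> rcases km3 with ⟨e3, b3⟩ | ⟨e3, b3⟩ <;>
          rw [e0, e1, e2, e3] <;> omega

-- ===== VERDICT (by name: the statement is the Claim_ definition above) =====
theorem generate_video_stream_spec : Claim_equal_generate_video_stream := by
  intro num_frames dim _ hpre
  unfold Spec_generate_video_stream generate_video_stream generate_video_stream_alt
  rcases hpre with hnf | hd
  · rw [PySem.List.pyRange_one_eq_nil hnf]
    rfl
  · simp only [PySem.List.foldl_append_singleton_eq_map, List.nil_append, pvEnumFold_eq]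
    apply List.map_congr_left
    intro t _
    have hmul : t * 4 = 4 * t := by ring
    rw [hmul]
    exact pv_frame_eq dim (PySem.Int.mod (4 * t) dim) hd
      (PySem.Int.mod_nonneg _ (by omega)) (PySem.Int.mod_lt _ (by omega))
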